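-- pv_equiv track=rewrite | github.com/aosid/prog | euler/project euler 38.py | array_mult
-- ===== SOURCE A (Python) =====
-- from string import digits
--
-- def array_mult(n):
--     char_set = set()
--     compare_set = set(digits)
--     compare_set.remove("0")
--     i = 1
--     while True:
--         if char_set == compare_set:
--             return (i-1)
--         nstr = str(n * i)
--         for char in nstr:
--             if char in char_set:
--                 return -1
--             char_set.add(char)
--         i += 1
-- ===== SOURCE B (Python) =====
-- def array_mult(n):
--     concat = ""
--     i = 1
--     while len(concat) < 9:
--         concat += str(n * i)
--         i += 1
--     if len(concat) == 9 and set(concat) == set("123456789"):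
--         return i - 1
--     return -1
-- ===== Notes on version B (the rewrite author's own statement) =====
-- stated objective: simpler
-- what changed: Replaces A's incremental duplicate-tracking set with per-character early exit by a plain length-bounded concatenation loop followed by a single terminal length-and-pandigital check.
import Mathlib
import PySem

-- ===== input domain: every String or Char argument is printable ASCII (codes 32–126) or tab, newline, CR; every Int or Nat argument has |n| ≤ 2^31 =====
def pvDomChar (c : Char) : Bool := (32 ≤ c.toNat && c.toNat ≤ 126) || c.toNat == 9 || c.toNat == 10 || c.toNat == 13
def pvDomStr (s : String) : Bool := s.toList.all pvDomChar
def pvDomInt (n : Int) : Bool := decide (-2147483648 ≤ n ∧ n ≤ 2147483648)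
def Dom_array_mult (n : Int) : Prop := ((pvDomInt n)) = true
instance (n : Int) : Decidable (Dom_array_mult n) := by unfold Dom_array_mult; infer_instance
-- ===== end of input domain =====

-- B replaces A's incremental duplicate-tracking set (with per-character early exit) by a plain
-- length-bounded concatenation loop and a single terminal pandigital check; objective: simpler.

-- ===== PORT A =====
-- compare_set = set(digits); compare_set.remove("0")   ('0' ∈ digits, so remove? is some; getD only totalizes)
def arrayMultCompareSet : PySem.Set Char :=
  (PySem.Set.remove? (PySem.Set.ofList "0123456789".toList) '0').getD PySem.Set.empty

-- the inner 'for char in nstr' loop: none = the early 'return -1', some = the updated char_set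
def arrayMultScan (S : PySem.Set Char) : List Char → Option (PySem.Set Char)
  | [] => some S
  | c :: cs => if PySem.Set.contains S c then none else arrayMultScan (PySem.Set.add S c) cs

-- the 'while True' loop; the fuel guard is never reached (each pass adds ≥ 1 char of an
-- 11-character alphabet to char_set, so the loop returns within 12 passes; proved below)
def arrayMultLoop (n : Int) : Nat → PySem.Set Char → Int → Int
  | 0, _, _ => -1
  | f + 1, S, i =>
    if PySem.Set.equal S arrayMultCompareSet then i - 1
    else
      match arrayMultScan S (PySem.Int.toChars (n * i)) with
      | none => -1
      | some S' => arrayMultLoop n f S' (i + 1)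

def array_mult (n : Int) : Int := arrayMultLoop n 13 PySem.Set.empty 1

-- ===== PORT B =====
-- str(m) is never empty (needed for the while-loop's termination)
theorem pvToDigitsCore_ne_nil : ∀ (f m : Nat) (l : List Char),
    (0 < f ∨ l ≠ []) → Nat.toDigitsCore 10 f m l ≠ [] := by
  intro f
  induction f with
  | zero => intro m l h; simp only [Nat.toDigitsCore]; tauto
  | succ f ih =>
    intro m l _
    simp only [Nat.toDigitsCore]
    split
    · simp
    · exact ih _ _ (Or.inr (by simp))

theorem pvToChars_ne_nil (m : Int) : PySem.Int.toChars m ≠ [] := by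
  unfold PySem.Int.toChars Nat.toDigits
  split
  · simp
  · exact pvToDigitsCore_ne_nil _ _ _ (Or.inl (Nat.succ_pos _))

-- while len(concat) < 9: concat += str(n*i); i += 1    (returns the final (concat, i))
def arrayMultAltLoop (n : Int) (concat : List Char) (i : Int) : List Char × Int :=
  if concat.length < 9 then
    arrayMultAltLoop n (concat ++ PySem.Int.toChars (n * i)) (i + 1)
  else (concat, i)
termination_by 9 - concat.length
decreasing_by
  have := List.length_pos_of_ne_nil (pvToChars_ne_nil (n * i))
  simp only [List.length_append]; omega

def array_mult_alt (n : Int) : Int :=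
  let p := arrayMultAltLoop n [] 1
  if p.1.length == 9 && PySem.Set.equal (PySem.Set.ofList p.1) (PySem.Set.ofList "123456789".toList)
  then p.2 - 1 else -1

-- ===== PRECONDITION & SPEC =====
def Spec_array_mult (n : Int) (out : Int) : Prop := out = array_mult_alt n
instance (n : Int) (out : Int) : Decidable (Spec_array_mult n out) := by unfold Spec_array_mult; infer_instance

-- ===== CLAIM (what is proved, stated in full; the proofs are below) =====
def Claim_equal_array_mult : Prop := ∀ (n : Int), Dom_array_mult n → Spec_array_mult n (array_mult n)

-- ===== LEMMAS AND PROOFS =====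

-- proof-side names
def pvNine : List Char := "123456789".toList
def pvAlphabet : List Char := '-' :: "0123456789".toList

def pvBFinish (p : List Char × Int) : Int :=
  if p.1.length == 9 && PySem.Set.equal (PySem.Set.ofList p.1) (PySem.Set.ofList "123456789".toList)
  then p.2 - 1 else -1

theorem pvAlt_eq_bFinish (n : Int) : array_mult_alt n = pvBFinish (arrayMultAltLoop n [] 1) := rfl

theorem pvCompareSet_eq : arrayMultCompareSet = pvNine := by decide

-- one unfolding step of A's loop
theorem pvLoop_succ (n : Int) (f : Nat) (S : PySem.Set Char) (i : Int) :
    arrayMultLoop n (f + 1) S i =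
      if PySem.Set.equal S arrayMultCompareSet then i - 1
      else
        match arrayMultScan S (PySem.Int.toChars (n * i)) with
        | none => -1
        | some S' => arrayMultLoop n f S' (i + 1) := rfl

-- Set.equal is the two-sided membership test
theorem pvEqual_iff (s t : List Char) :
    PySem.Set.equal s t = true ↔ (∀ x, x ∈ s ↔ x ∈ t) := by
  simp only [PySem.Set.equal, PySem.Set.issubset, PySem.Set.contains, Bool.and_eq_true,
    List.all_eq_true, List.contains_iff_mem]
  constructor
  · rintro ⟨h1, h2⟩ x; exact ⟨h1 x, h2 x⟩
  · intro h; exact ⟨fun x hx => (h x).1 hx, fun x hx => (h x).2 hx⟩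

-- every character of str(m) is a digit or '-'
theorem pvDigitChar_mem (m : Nat) (h : m < 10) : Nat.digitChar m ∈ "0123456789".toList := by
  interval_cases m <;> decide

theorem pvToDigitsCore_subset : ∀ (f m : Nat) (l : List Char), ∀ c ∈ Nat.toDigitsCore 10 f m l,
    c ∈ l ∨ c ∈ "0123456789".toList := by
  intro f
  induction f with
  | zero => intro m l c hc; simp only [Nat.toDigitsCore] at hc; exact Or.inl hc
  | succ f ih =>
    intro m l c hc
    simp only [Nat.toDigitsCore] at hc
    split at hc
    · rcases List.mem_cons.mp hc with h | h
      · exact Or.inr (h ▸ pvDigitChar_mem _ (Nat.mod_lt _ (by norm_num)))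
      · exact Or.inl h
    · rcases ih _ _ _ hc with h | h
      · rcases List.mem_cons.mp h with h' | h'
        · exact Or.inr (h' ▸ pvDigitChar_mem _ (Nat.mod_lt _ (by norm_num)))
        · exact Or.inl h'
      · exact Or.inr h

theorem pvToChars_subset (m : Int) : ∀ c ∈ PySem.Int.toChars m, c ∈ pvAlphabet := by
  intro c hc
  unfold PySem.Int.toChars at hc
  unfold pvAlphabet
  split at hc
  · rcases List.mem_cons.mp hc with h | h
    · exact h ▸ List.mem_cons_self
    · rcases pvToDigitsCore_subset _ _ _ _ h with h' | h'
      · simp at h'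
      · exact List.mem_cons_of_mem _ h'
  · rcases pvToDigitsCore_subset _ _ _ _ hc with h' | h'
    · simp at h'
    · exact List.mem_cons_of_mem _ h'

-- the inner scan, characterised
theorem pvScan_eq : ∀ (cs : List Char) (S : PySem.Set Char), S.Nodup →
    arrayMultScan S cs = if (S ++ cs).Nodup then some (S ++ cs) else none := by
  intro cs
  induction cs with
  | nil => intro S hS; simp [arrayMultScan, hS]
  | cons c cs ih =>
    intro S hS
    simp only [arrayMultScan, PySem.Set.contains]
    by_cases hc : c ∈ S
    · rw [if_pos (by simpa using hc), if_neg]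
      intro hnd
      rcases List.nodup_append.mp hnd with ⟨_, _, hdisj⟩
      exact hdisj c hc c List.mem_cons_self rfl
    · rw [if_neg (by simpa using hc)]
      have hadd : PySem.Set.add S c = S ++ [c] := by
        simp only [PySem.Set.add, PySem.Set.contains]
        rw [if_neg (by simpa using hc)]
      have hnd : (S ++ [c]).Nodup := by
        rw [List.nodup_append]
        refine ⟨hS, List.nodup_singleton c, ?_⟩
        intro a ha b hb
        simp only [List.mem_singleton] at hb
        subst hb
        exact fun h => hc (h ▸ ha)
      rw [hadd, ih _ hnd, List.append_assoc]
      rfl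

-- ofList is the identity on duplicate-free lists
theorem pvOfList_nodup : ∀ (c : List Char) (s : List Char), (s ++ c).Nodup →
    List.foldl PySem.Set.add s c = s ++ c := by
  intro c
  induction c with
  | nil => intro s _; simp
  | cons x xs ih =>
    intro s hnd
    have hx : x ∉ s := by
      rcases List.nodup_append.mp hnd with ⟨_, _, hdisj⟩
      exact fun h => hdisj x h x List.mem_cons_self rfl
    have hadd : PySem.Set.add s x = s ++ [x] := by
      simp only [PySem.Set.add, PySem.Set.contains]
      rw [if_neg (by simpa using hx)]
    simp only [List.foldl_cons, hadd]
    rw [ih (s ++ [x]) (by simpa [List.append_assoc] using hnd), List.append_assoc]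
    rfl

theorem pvOfList_id (c : List Char) (h : c.Nodup) : PySem.Set.ofList c = c := by
  have := pvOfList_nodup c [] (by simpa using h)
  simpa [PySem.Set.ofList, PySem.Set.empty] using this

theorem pvMem_ofList (c : List Char) (x : Char) : x ∈ PySem.Set.ofList c ↔ x ∈ c := by
  rw [← PySem.List.dedup_eq_ofList c]
  exact PySem.List.mem_dedup c x

-- mem-iff + length 9 forces a permutation of "123456789"
theorem pvPerm_of_memiff (c : List Char) (hlen : c.length = 9)
    (hmem : ∀ x, x ∈ c ↔ x ∈ pvNine) : c.Perm pvNine := by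
  have hnine : pvNine.Nodup := by decide
  have hsub : pvNine ⊆ c := fun x hx => (hmem x).2 hx
  have hsp : pvNine.Subperm c := List.subperm_of_subset hnine hsub
  exact (hsp.perm_of_length_le (by simp [hlen, pvNine])).symm

theorem pvPerm_of_equal (c : List Char) (hnd : c.Nodup)
    (heq : PySem.Set.equal c pvNine = true) : c.Perm pvNine := by
  have hmem := (pvEqual_iff _ _).mp heq
  have hnine : pvNine.Nodup := by decide
  have h1 : c.Subperm pvNine := List.subperm_of_subset hnd (fun x hx => (hmem x).1 hx)
  exact pvPerm_of_memiff c (le_antisymm h1.length_le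
    ((List.subperm_of_subset hnine (fun x hx => (hmem x).2 hx)).length_le)) hmem

theorem pvEqual_of_perm (c : List Char) (h : c.Perm pvNine) :
    PySem.Set.equal c pvNine = true :=
  (pvEqual_iff _ _).mpr fun _ => h.mem_iff

-- B's finish returns -1 from any duplicate-carrying state
theorem pvBdup : ∀ (n : Int) (c : List Char) (i : Int), ¬ c.Nodup →
    pvBFinish (arrayMultAltLoop n c i) = -1 := by
  intro n c i hnd
  fun_induction arrayMultAltLoop n c i with
  | case1 c i h ih =>
    exact ih (fun hnd' => hnd (List.Nodup.of_append_left hnd'))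
  | case2 c i h =>
    unfold pvBFinish
    rw [if_neg]
    simp only [Bool.and_eq_true, beq_iff_eq]
    rintro ⟨hlen, heq⟩
    have hmem := (pvEqual_iff _ _).mp heq
    have hperm := pvPerm_of_memiff c hlen
      (fun x => by rw [← pvMem_ofList]; exact hmem x |>.trans (pvMem_ofList _ _))
    exact hnd (hperm.nodup_iff.mpr (by decide))

-- A's loop returns -1 from any over-threshold non-pandigital state
theorem pvBig : ∀ (f : Nat) (n : Int) (c : PySem.Set Char) (i : Int),
    c.Nodup → (∀ x ∈ c, x ∈ pvAlphabet) → 9 ≤ c.length → ¬ c.Perm pvNine →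
    12 ≤ f + c.length → arrayMultLoop n f c i = -1 := by
  intro f
  induction f with
  | zero => intro n c i _ _ _ _ _; rfl
  | succ f ih =>
    intro n c i hnd hsub hlen hperm hf
    have hne : ¬ PySem.Set.equal c arrayMultCompareSet = true := by
      rw [pvCompareSet_eq]
      exact fun heq => hperm (pvPerm_of_equal c hnd heq)
    rw [pvLoop_succ, if_neg hne, pvScan_eq _ _ hnd]
    by_cases hnd' : (c ++ PySem.Int.toChars (n * i)).Nodup
    · rw [if_pos hnd']
      show arrayMultLoop n f (c ++ PySem.Int.toChars (n * i)) (i + 1) = -1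
      have hsub' : ∀ x ∈ c ++ PySem.Int.toChars (n * i), x ∈ pvAlphabet := by
        intro x hx
        rcases List.mem_append.mp hx with h | h
        · exact hsub x h
        · exact pvToChars_subset _ x h
      have hlen' : c.length + 1 ≤ (c ++ PySem.Int.toChars (n * i)).length := by
        have := List.length_pos_of_ne_nil (pvToChars_ne_nil (n * i))
        simp only [List.length_append]; omega
      have hb : (c ++ PySem.Int.toChars (n * i)).length ≤ 11 := by
        have := (List.subperm_of_subset hnd' hsub').length_le
        simpa [pvAlphabet] using this
      refine ih n (c ++ PySem.Int.toChars (n * i)) (i + 1) hnd' hsub' (by omega) ?_ (by omega)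
      intro hp
      have hl := hp.length_eq
      have hcs1 : 1 ≤ (PySem.Int.toChars (n * i)).length :=
        List.length_pos_of_ne_nil (pvToChars_ne_nil (n * i))
      simp only [List.length_append] at hl
      simp only [pvNine] at hl
      have h9 : pvNine.length = 9 := by decide
      simp only [pvNine] at h9
      omega
    · rw [if_neg hnd']

-- the two loops, matched below the length-9 threshold
theorem pvRel : ∀ (f : Nat) (n : Int) (c : List Char) (i : Int),
    c.Nodup → (∀ x ∈ c, x ∈ pvAlphabet) → c.length < 9 → 12 ≤ f + c.length →
    arrayMultLoop n f c i = pvBFinish (arrayMultAltLoop n c i) := by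
  intro f
  induction f with
  | zero => intro n c i _ _ h hf; omega
  | succ f ih =>
    intro n c i hnd hsub hlen hf
    have hstep : arrayMultAltLoop n c i
        = arrayMultAltLoop n (c ++ PySem.Int.toChars (n * i)) (i + 1) := by
      rw [arrayMultAltLoop, if_pos hlen]
    have hne : ¬ PySem.Set.equal c arrayMultCompareSet = true := by
      rw [pvCompareSet_eq]
      intro heq
      have := (pvPerm_of_equal c hnd heq).length_eq
      simp [pvNine] at this
      omega
    rw [pvLoop_succ, if_neg hne, pvScan_eq _ _ hnd, hstep]
    have hcs1 : 1 ≤ (PySem.Int.toChars (n * i)).length :=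
      List.length_pos_of_ne_nil (pvToChars_ne_nil (n * i))
    by_cases hnd' : (c ++ PySem.Int.toChars (n * i)).Nodup
    · rw [if_pos hnd']
      set cs := PySem.Int.toChars (n * i) with hcs
      show arrayMultLoop n f (c ++ cs) (i + 1) = _
      have hsub' : ∀ x ∈ c ++ cs, x ∈ pvAlphabet := by
        intro x hx
        rcases List.mem_append.mp hx with h | h
        · exact hsub x h
        · exact pvToChars_subset _ x h
      by_cases hlt : (c ++ cs).length < 9
      · rw [ih n _ (i + 1) hnd' hsub' hlt (by simp only [List.length_append]; omega)]
      · have hstop : arrayMultAltLoop n (c ++ cs) (i + 1) = (c ++ cs, i + 1) := by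
          rw [arrayMultAltLoop, if_neg hlt]
        rw [hstop]
        by_cases hperm : (c ++ cs).Perm pvNine
        · have hl9 : (c ++ cs).length = 9 := by
            have := hperm.length_eq; simpa [pvNine] using this
          obtain ⟨f', rfl⟩ : ∃ f', f = f' + 1 := ⟨f - 1, by omega⟩
          rw [pvLoop_succ, if_pos, pvBFinish, if_pos]
          · simp only [Bool.and_eq_true, beq_iff_eq]
            exact ⟨hl9, by rw [pvOfList_id _ hnd']; exact pvEqual_of_perm _ hperm⟩
          · rw [pvCompareSet_eq]; exact pvEqual_of_perm _ hperm
        · rw [pvBig f n (c ++ cs) (i + 1) hnd' hsub' (by omega) hperm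
            (by simp only [List.length_append]; omega)]
          unfold pvBFinish
          rw [if_neg]
          simp only [Bool.and_eq_true, beq_iff_eq]
          rintro ⟨hl9, heq⟩
          rw [pvOfList_id _ hnd'] at heq
          exact hperm (pvPerm_of_equal _ hnd' heq)
    · rw [if_neg hnd']
      show (-1 : Int) = _
      exact (pvBdup n _ (i + 1) hnd').symm

-- ===== VERDICT (by name: the statement is the Claim_ definition above) =====
theorem array_mult_spec : Claim_equal_array_mult := by
  intro n _
  unfold Spec_array_mult
  rw [pvAlt_eq_bFinish]
  exact pvRel 13 n [] 1 List.nodup_nil (by simp) (by simp) (by simp)
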